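-- pv_equiv track=rewrite | github.com/ulis891/Python_Lessons | S3.2/HW 3.2.py | search_nearest
-- ===== SOURCE A (Python) =====
-- def search_nearest(array: list, number: int) -> list:
--     """Поиск ближайших чисел"""
--     near = abs(array[0] - number)
--     nearest_numbers = []
--     nearest_numbers.append(array[0])
--     for i in array:
--         if abs(i - number) < near:
--             nearest_numbers = []
--             nearest_numbers.append(i)
--             near = abs(i - number)
--         elif abs(i - number) == near and i not in nearest_numbers:
--             nearest_numbers.append(i)
--     return nearest_numbers
-- ===== SOURCE B (Python) =====
-- def search_nearest(array: list, number: int) -> list: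
--     """Поиск ближайших чисел: two-pass — find the minimal distance, then filter."""
--     near = abs(array[0] - number)
--     for x in array:
--         d = abs(x - number)
--         if d < near:
--             near = d
--     result = []
--     for x in array:
--         if abs(x - number) == near and x not in result:
--             result.append(x)
--     return result
-- ===== Notes on version B (the rewrite author's own statement) =====
-- stated objective: simpler
-- what changed: Replaces A's single maintain-and-reset scan (which tracks and repeatedly clears a candidate list while the running minimum improves) with a two-pass decomposition: first compute the minimum distance, then filter the distinct elements at that distance in first-appearance order.
import Mathlib
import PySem

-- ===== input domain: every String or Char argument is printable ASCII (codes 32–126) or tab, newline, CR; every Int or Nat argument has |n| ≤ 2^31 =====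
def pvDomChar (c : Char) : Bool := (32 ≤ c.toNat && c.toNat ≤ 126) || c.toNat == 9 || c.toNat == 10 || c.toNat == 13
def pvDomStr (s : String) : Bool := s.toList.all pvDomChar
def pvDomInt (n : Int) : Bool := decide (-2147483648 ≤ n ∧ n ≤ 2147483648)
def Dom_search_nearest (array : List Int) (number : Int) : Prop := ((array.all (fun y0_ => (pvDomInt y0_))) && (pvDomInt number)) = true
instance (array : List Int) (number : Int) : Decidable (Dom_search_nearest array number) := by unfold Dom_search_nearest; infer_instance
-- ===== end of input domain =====

-- B rewrites A's single maintain-and-reset scan as a two-pass compute-minimum-then-filter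
-- decomposition (objective: simpler); return values agree on all nonempty arrays.

-- ===== PORT A =====
-- A's loop body: reset the candidate list on a strict improvement, append on a tie not yet listed.
def pvStepA (number : Int) (st : Int × List Int) (i : Int) : Int × List Int :=
  if |i - number| < st.1 then (|i - number|, [i])
  else if |i - number| = st.1 ∧ i ∉ st.2 then (st.1, st.2 ++ [i])
  else st

def search_nearest (array : List Int) (number : Int) : List Int :=
  match array with
  | [] => []   -- Python raises IndexError here; excluded by Pre_search_nearest
  | a0 :: _ => (array.foldl (pvStepA number) (|a0 - number|, [a0])).2

-- ===== PORT B =====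
-- B pass 1: running minimum of the distances.
def pvMinStep (number : Int) (m : Int) (x : Int) : Int :=
  if |x - number| < m then |x - number| else m

-- B pass 2: collect distinct elements at the minimal distance, in order.
def pvSelStep (number near : Int) (acc : List Int) (x : Int) : List Int :=
  if |x - number| = near ∧ x ∉ acc then acc ++ [x] else acc

def search_nearest_alt (array : List Int) (number : Int) : List Int :=
  match array with
  | [] => []   -- Source B raises IndexError here; excluded by Pre_search_nearest
  | a0 :: _ =>
    let near := array.foldl (pvMinStep number) |a0 - number|
    array.foldl (pvSelStep number near) []

-- ===== PRECONDITION & SPEC =====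
-- Both A and B index array[0], so the empty list raises IndexError in both.
def Pre_search_nearest (array : List Int) (number : Int) : Prop := array ≠ []
instance (array : List Int) (number : Int) : Decidable (Pre_search_nearest array number) := by
  unfold Pre_search_nearest; infer_instance

def pvWitness_search_nearest : List Int × Int := ([3, 7, 3], 5)

def Spec_search_nearest (array : List Int) (number : Int) (out : List Int) : Prop := out = search_nearest_alt array number
instance (array : List Int) (number : Int) (out : List Int) : Decidable (Spec_search_nearest array number out) := by unfold Spec_search_nearest; infer_instance

-- ===== CLAIM (what is proved, stated in full; the proofs are below) =====
def Claim_equal_search_nearest : Prop := ∀ (array : List Int) (number : Int), Dom_search_nearest array number → Pre_search_nearest array number → Spec_search_nearest array number (search_nearest array number)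

-- ===== LEMMAS AND PROOFS =====

-- The running minimum never increases.
lemma minfold_le (number : Int) : ∀ (l : List Int) (m : Int),
    l.foldl (pvMinStep number) m ≤ m := by
  intro l
  induction l with
  | nil => intro m; simp
  | cons x t ih =>
    intro m
    have h := ih (pvMinStep number m x)
    have : pvMinStep number m x ≤ m := by
      unfold pvMinStep; split_ifs with h' <;> omega
    simpa [List.foldl] using le_trans h this

-- A's fold equals the running minimum paired with B's selection fold, the latter started
-- from acc when the minimum never improved and from [] otherwise.
lemma foldA_eq (number : Int) : ∀ (l : List Int) (m : Int) (acc : List Int),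
    l.foldl (pvStepA number) (m, acc) =
      (l.foldl (pvMinStep number) m,
       l.foldl (pvSelStep number (l.foldl (pvMinStep number) m))
         (if l.foldl (pvMinStep number) m = m then acc else [])) := by
  intro l
  induction l with
  | nil => intro m acc; simp
  | cons x t ih =>
    intro m acc
    by_cases h1 : |x - number| < m
    · -- strict improvement: A resets to [x]
      have hm : pvMinStep number m x = |x - number| := by simp [pvMinStep, h1]
      have hM : t.foldl (pvMinStep number) |x - number| ≤ |x - number| :=
        minfold_le number t _
      have hne : t.foldl (pvMinStep number) |x - number| ≠ m := by omega
      have hstep : pvStepA number (m, acc) x = (|x - number|, [x]) := by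
        simp [pvStepA, h1]
      rw [List.foldl_cons, List.foldl_cons, List.foldl_cons, hstep, hm, ih]
      simp only [if_neg hne]
      congr 1
      by_cases h2 : t.foldl (pvMinStep number) |x - number| = |x - number|
      · simp [h2, pvSelStep]
      · have hne2 : ¬ (|x - number| = t.foldl (pvMinStep number) |x - number|) :=
          fun h => h2 h.symm
        simp [h2, pvSelStep, hne2]
    · -- no improvement: minimum seed unchanged
      have hm : pvMinStep number m x = m := by simp [pvMinStep, h1]
      have hM : t.foldl (pvMinStep number) m ≤ m := minfold_le number t _
      have hd : m ≤ |x - number| := by omega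
      have hstep : pvStepA number (m, acc) x =
          (m, if |x - number| = m ∧ x ∉ acc then acc ++ [x] else acc) := by
        unfold pvStepA; simp [h1]
        split_ifs <;> rfl
      rw [List.foldl_cons, List.foldl_cons, List.foldl_cons, hstep, hm, ih]
      congr 1
      by_cases h2 : t.foldl (pvMinStep number) m = m
      · simp [h2, pvSelStep]
      · have hlt : t.foldl (pvMinStep number) m < m := lt_of_le_of_ne hM h2
        have hne : |x - number| ≠ t.foldl (pvMinStep number) m := by omega
        simp [if_neg h2, pvSelStep, hne]

-- ===== VERDICT (by name: the statement is the Claim_ definition above) =====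
theorem search_nearest_spec : Claim_equal_search_nearest := by
  intro array number _ hpre
  unfold Spec_search_nearest
  match array with
  | [] => exact absurd rfl hpre
  | a0 :: rest =>
    unfold search_nearest search_nearest_alt
    simp only []
    rw [foldA_eq]
    set M := (a0 :: rest).foldl (pvMinStep number) |a0 - number| with hMdef
    by_cases h : M = |a0 - number|
    · -- seed [a0] and seed [] converge after the first selection step
      simp only [if_pos h]
      rw [List.foldl_cons, List.foldl_cons]
      have h1 : pvSelStep number M [a0] a0 = [a0] := by simp [pvSelStep]
      have h2 : pvSelStep number M [] a0 = [a0] := by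
        simp [pvSelStep, h.symm]
      rw [h1, h2]
    · simp only [if_neg h]
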